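-- pv_equiv track=rewrite | github.com/felixledem/algorithms | num_of_equileaders.py | get_leaders
-- ===== SOURCE A (Python) =====
-- from collections import deque
--
-- def get_leaders(A):
--     result = []
--     stack = deque()
--     leader_counts = dict()
--     for i in range(len(A)):
--         x = A[i]
--         if len(stack) == 0:
--             stack.append(x)
--
--         else:
--             if x == stack[-1]:
--                 stack.append(x)
--             else:
--                 stack.pop()
--
--         if x in leader_counts:
--             leader_counts[x] += 1
--         else:
--             leader_counts[x] = 1
--
--         if len(stack) != 0:
--             l = stack[-1]  # candidate
--             if leader_counts[l] > (i + 1) / 2: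
--                 result.append(l)
--             else:
--                 result.append(None)
--         else:
--             result.append(None)
--     return result
-- ===== SOURCE B (Python) =====
-- def get_leaders(A):
--     result = []
--     counts = {}
--     best = None
--     best_count = 0
--     for i, x in enumerate(A):
--         c = counts.get(x, 0) + 1
--         counts[x] = c
--         if c > best_count:
--             best = x
--             best_count = c
--         result.append(best if 2 * best_count > i + 1 else None)
--     return result
-- ===== Notes on version B (the rewrite author's own statement) =====
-- stated objective: simpler
-- what changed: Replaces the Boyer-Moore-style candidate deque with a single frequency dict plus a running (best, best_count) maximum; the strict-majority test 2*best_count > i+1 then decides the per-prefix leader directly, with no candidate stack at all.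
import Mathlib
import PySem

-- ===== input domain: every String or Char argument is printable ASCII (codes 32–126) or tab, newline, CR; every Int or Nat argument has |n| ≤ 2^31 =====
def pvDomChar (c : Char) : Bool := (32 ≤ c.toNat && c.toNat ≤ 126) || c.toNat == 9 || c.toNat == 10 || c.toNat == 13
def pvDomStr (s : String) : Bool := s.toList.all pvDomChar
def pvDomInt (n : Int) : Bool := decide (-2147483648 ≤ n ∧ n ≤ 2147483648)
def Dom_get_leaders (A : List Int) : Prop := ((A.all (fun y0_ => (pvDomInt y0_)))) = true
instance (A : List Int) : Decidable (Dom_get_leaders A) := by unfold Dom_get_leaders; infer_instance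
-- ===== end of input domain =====

-- B replaces A's Boyer-Moore candidate deque with a frequency dict plus a running maximum (simpler).


-- ===== PORT A =====
-- one loop iteration of A: state = (result, stack, leader_counts, i)
-- (the deque holds only copies of one value, so push/top/pop on a cons-list is an exact stack transliteration;
--  'leader_counts[l] > (i+1)/2' is an int > float comparison, exact here as 2*count > i+1 since all values are far below 2^53)
def stepA : List (Option Int) × List Int × PySem.Dict Int Int × Int → Int →
    List (Option Int) × List Int × PySem.Dict Int Int × Int
  | (result, stack, counts, i), x =>
    let stack' := match stack with
      | [] => [x]
      | t :: rest => if x = t then x :: t :: rest else rest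
    let counts' := match counts.get? x with
      | some cv => counts.insert x (cv + 1)
      | none => counts.insert x 1
    let result' := match stack' with
      | [] => result ++ [none]
      | l :: _ => if 2 * counts'.getD l 0 > i + 1 then result ++ [some l] else result ++ [none]
    (result', stack', counts', i + 1)

def get_leaders (A : List Int) : List (Option Int) :=
  (A.foldl stepA ([], [], PySem.Dict.empty, 0)).1

-- ===== PORT B =====
-- one loop iteration of B: state = (result, counts, best, best_count, i)
def stepB : List (Option Int) × PySem.Dict Int Int × Option Int × Int × Int → Int →
    List (Option Int) × PySem.Dict Int Int × Option Int × Int × Int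
  | (result, counts, best, bc, i), x =>
    let cv := counts.getD x 0 + 1
    let counts' := counts.insert x cv
    let best' := if cv > bc then some x else best
    let bc' := if cv > bc then cv else bc
    let result' := result ++ [if 2 * bc' > i + 1 then best' else none]
    (result', counts', best', bc', i + 1)

def get_leaders_alt (A : List Int) : List (Option Int) :=
  (A.foldl stepB ([], PySem.Dict.empty, none, 0, 0)).1

-- ===== PRECONDITION & SPEC =====
def Spec_get_leaders (A : List Int) (out : List (Option Int)) : Prop := out = get_leaders_alt A
instance (A : List Int) (out : List (Option Int)) : Decidable (Spec_get_leaders A out) := by unfold Spec_get_leaders; infer_instance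

-- ===== CLAIM (what is proved, stated in full; the proofs are below) =====
def Claim_equal_get_leaders : Prop := ∀ (A : List Int), Dom_get_leaders A → Spec_get_leaders A (get_leaders A)

-- ===== LEMMAS AND PROOFS =====

-- two distinct values: their counts cannot both exceed half the length
lemma count_pair_le (p : List Int) (m m' : Int) (h : m ≠ m') :
    p.count m + p.count m' ≤ p.length := by
  induction p with
  | nil => simp
  | cons a t ih =>
    simp only [List.count_cons, List.length_cons, beq_iff_eq]
    split_ifs with h1 h2 h2
    · exact absurd (h1.symm.trans h2) h
    all_goals omega


-- the value both programs append for a prefix p, given the two invariants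
lemma out_agree (p : List Int) (k : Nat) (c : Int) (best : Option Int) (bc : Int)
    (hk : ∀ y, 2 * p.count y + k ≤ p.length + (if y = c then 2 * k else 0))
    (hbc : ∀ y, (p.count y : Int) ≤ bc)
    (hbest : (bc = 0 ∧ best = none) ∨ ∃ m, best = some m ∧ (p.count m : Int) = bc) :
    (match List.replicate k c with
     | [] => (none : Option Int)
     | l :: _ => if 2 * ((p.count l : Int)) > (p.length : Int) then some l else none)
      = (if 2 * bc > (p.length : Int) then best else none) := by
  cases k with
  | zero =>
    have hno : ¬ 2 * bc > (p.length : Int) := by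
      rcases hbest with ⟨h0, _⟩ | ⟨m, _, hcm⟩
      · omega
      · have h1 := hk m
        rcases eq_or_ne m c with rfl | hmc
        · simp at h1; omega
        · simp [hmc] at h1; omega
    rw [List.replicate_zero]
    simp [hno]
  | succ s =>
    rw [List.replicate_succ]
    by_cases h1 : 2 * ((p.count c : Int)) > (p.length : Int)
    · have hb2 : 2 * bc > (p.length : Int) := by have := hbc c; omega
      rcases hbest with ⟨h0, _⟩ | ⟨m, hb, hcm⟩
      · exfalso; have := hbc c; omega
      · subst hb
        show (if 2 * ((p.count c : Int)) > (p.length : Int) then some c else none) = _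
        rw [if_pos h1, if_pos hb2]
        by_cases hmc : m = c
        · subst hmc; rfl
        · exfalso
          have hp := count_pair_le p m c hmc
          omega
    · have hno : ¬ 2 * bc > (p.length : Int) := by
        intro hgt
        rcases hbest with ⟨h0, _⟩ | ⟨m, hb, hcm⟩
        · omega
        · by_cases hmc : m = c
          · subst hmc; omega
          · have h2 := hk m
            simp [hmc] at h2
            omega
      show (if 2 * ((p.count c : Int)) > (p.length : Int) then some c else none) = _
      rw [if_neg h1, if_neg hno]

-- pushing the common append outside an if
lemma ite_push (C : Prop) [inst : Decidable C] (res : List (Option Int)) (a b : Option Int) :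
    (if C then res ++ [a] else res ++ [b]) = res ++ [if C then a else b] := by
  split_ifs <;> rfl

-- facts about counts and length of the extended prefix (Nat versions for the stack invariant)
lemma countN_app_self (p : List Int) (x : Int) : (p ++ [x]).count x = p.count x + 1 := by simp

lemma countN_app_ne (p : List Int) (x y : Int) (h : y ≠ x) : (p ++ [x]).count y = p.count y := by
  simp [Ne.symm h]

-- main loop invariant: both folds produce the same result list
lemma fold_agree (rest : List Int) :
    ∀ (p : List Int) (res : List (Option Int)) (cnts : PySem.Dict Int Int)
      (k : Nat) (c : Int) (best : Option Int) (bc : Int),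
      (∀ y, 2 * p.count y + k ≤ p.length + (if y = c then 2 * k else 0)) →
      (∀ y, cnts.getD y 0 = (p.count y : Int)) →
      (∀ y, (p.count y : Int) ≤ bc) →
      ((bc = 0 ∧ best = none) ∨ ∃ m, best = some m ∧ (p.count m : Int) = bc) →
      (rest.foldl stepA (res, List.replicate k c, cnts, (p.length : Int))).1
        = (rest.foldl stepB (res, cnts, best, bc, (p.length : Int))).1 := by
  induction rest with
  | nil => intros; rfl
  | cons x rest ih =>
    intro p res cnts k c best bc hk hcnts hbc hbest
    have hx : cnts.getD x 0 = (p.count x : Int) := hcnts x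
    have hdict : (match cnts.get? x with
        | some cv => cnts.insert x (cv + 1)
        | none => cnts.insert x 1) = cnts.insert x (cnts.getD x 0 + 1) := by
      rw [PySem.Dict.getD_eq_get?_getD]
      cases hg : cnts.get? x <;> simp
    have hcnts' : ∀ y, (cnts.insert x (cnts.getD x 0 + 1)).getD y 0 = (((p ++ [x]).count y : Nat) : Int) := by
      intro y
      rw [PySem.Dict.getD_insert]
      by_cases hyx : y = x
      · subst hyx
        rw [if_pos rfl, hx, countN_app_self]
        push_cast
        ring
      · rw [if_neg hyx, hcnts y, countN_app_ne p x y hyx]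
    have hlen : (((p ++ [x]).length : Nat) : Int) = (p.length : Int) + 1 := by
      simp
    have hcx : ((p ++ [x]).count x : Int) = (p.count x : Int) + 1 := by
      rw [countN_app_self]; push_cast; ring
    -- B-side invariants for the extended prefix (best'/bc' kept as the if-terms stepB produces)
    have hbc2 : ∀ y, (((p ++ [x]).count y : Nat) : Int)
        ≤ (if cnts.getD x 0 + 1 > bc then cnts.getD x 0 + 1 else bc) := by
      intro y
      by_cases hgt : cnts.getD x 0 + 1 > bc
      · rw [if_pos hgt]
        by_cases hyx : y = x
        · subst hyx; rw [hcx, hx]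
        · rw [countN_app_ne p x y hyx]; have := hbc y; omega
      · rw [if_neg hgt]
        by_cases hyx : y = x
        · subst hyx; rw [hcx]; omega
        · rw [countN_app_ne p x y hyx]; exact hbc y
    have hbest2 : ((if cnts.getD x 0 + 1 > bc then cnts.getD x 0 + 1 else bc) = 0 ∧
          (if cnts.getD x 0 + 1 > bc then some x else best) = none) ∨
        ∃ m, (if cnts.getD x 0 + 1 > bc then some x else best) = some m ∧
          (((p ++ [x]).count m : Nat) : Int) = (if cnts.getD x 0 + 1 > bc then cnts.getD x 0 + 1 else bc) := by
      by_cases hgt : cnts.getD x 0 + 1 > bc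
      · exact Or.inr ⟨x, by rw [if_pos hgt], by rw [if_pos hgt, hcx, hx]⟩
      · rcases hbest with ⟨h0, _⟩ | ⟨m, hb, hcm⟩
        · exfalso
          have := hx
          have hnn : (0 : Int) ≤ (p.count x : Int) := by positivity
          omega
        · have hmx : m ≠ x := by
            intro hmx; subst hmx
            rw [hx] at hgt
            omega
          exact Or.inr ⟨m, by rw [if_neg hgt]; exact hb,
            by rw [if_neg hgt, countN_app_ne p x m hmx]; exact hcm⟩
    -- A-side: case analysis on the stack
    cases k with
    | zero =>
      -- empty stack: push x, new stack = [x]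
      have hk' : ∀ y, 2 * (p ++ [x]).count y + 1 ≤ (p ++ [x]).length + (if y = x then 2 * 1 else 0) := by
        intro y
        have h0 := hk y
        by_cases hyx : y = x
        · subst hyx
          rw [countN_app_self]
          by_cases hyc : y = c <;> simp [hyc] at h0 ⊢ <;> omega
        · rw [countN_app_ne p x y hyx]
          by_cases hyc : y = c <;> simp [hyx, hyc] at h0 ⊢ <;> omega
      have hout := out_agree (p ++ [x]) 1 x
        (if cnts.getD x 0 + 1 > bc then some x else best)
        (if cnts.getD x 0 + 1 > bc then cnts.getD x 0 + 1 else bc) hk' hbc2 hbest2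
      have hA : (if 2 * (((p ++ [x]).count x : Nat) : Int) > (((p ++ [x]).length : Nat) : Int)
          then some x else none)
          = (if 2 * (if cnts.getD x 0 + 1 > bc then cnts.getD x 0 + 1 else bc)
              > (((p ++ [x]).length : Nat) : Int)
            then (if cnts.getD x 0 + 1 > bc then some x else best) else none) := hout
      simp only [List.foldl_cons, List.replicate_zero, stepA, stepB, hdict]
      simp only [hcnts', ← hlen]
      rw [ite_push, hA]
      exact ih (p ++ [x]) _ _ 1 x _ _ hk' hcnts' hbc2 hbest2
    | succ s =>
      by_cases hxc : x = c
      · -- top of stack equals x: push, new stack = replicate (s+2) x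
        subst hxc
        have hk' : ∀ y, 2 * (p ++ [x]).count y + (s + 2)
            ≤ (p ++ [x]).length + (if y = x then 2 * (s + 2) else 0) := by
          intro y
          have h0 := hk y
          by_cases hyx : y = x
          · subst hyx
            rw [countN_app_self]
            simp at h0 ⊢
            omega
          · rw [countN_app_ne p x y hyx]
            simp [hyx] at h0 ⊢
            omega
        have hout := out_agree (p ++ [x]) (s + 2) x
          (if cnts.getD x 0 + 1 > bc then some x else best)
          (if cnts.getD x 0 + 1 > bc then cnts.getD x 0 + 1 else bc) hk' hbc2 hbest2
        have hA : (if 2 * (((p ++ [x]).count x : Nat) : Int) > (((p ++ [x]).length : Nat) : Int)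
            then some x else none)
            = (if 2 * (if cnts.getD x 0 + 1 > bc then cnts.getD x 0 + 1 else bc)
                > (((p ++ [x]).length : Nat) : Int)
              then (if cnts.getD x 0 + 1 > bc then some x else best) else none) := hout
        simp only [List.foldl_cons, List.replicate_succ, stepA, stepB, hdict, if_true]
        simp only [hcnts', ← hlen]
        rw [ite_push, hA]
        exact ih (p ++ [x]) _ _ (s + 2) x _ _ hk' hcnts' hbc2 hbest2
      · -- top differs: pop, new stack = replicate s c
        have hk' : ∀ y, 2 * (p ++ [x]).count y + s
            ≤ (p ++ [x]).length + (if y = c then 2 * s else 0) := by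
          intro y
          have h0 := hk y
          by_cases hyx : y = x
          · subst hyx
            rw [countN_app_self]
            simp [hxc] at h0 ⊢
            omega
          · rw [countN_app_ne p x y hyx]
            by_cases hyc : y = c <;> simp [hyc] at h0 ⊢ <;> omega
        have hout := out_agree (p ++ [x]) s c
          (if cnts.getD x 0 + 1 > bc then some x else best)
          (if cnts.getD x 0 + 1 > bc then cnts.getD x 0 + 1 else bc) hk' hbc2 hbest2
        cases s with
        | zero =>
          have hA : (none : Option Int)
              = (if 2 * (if cnts.getD x 0 + 1 > bc then cnts.getD x 0 + 1 else bc)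
                  > (((p ++ [x]).length : Nat) : Int)
                then (if cnts.getD x 0 + 1 > bc then some x else best) else none) := hout
          simp only [List.foldl_cons, List.replicate_succ, List.replicate_zero,
            stepA, stepB, hdict, if_neg hxc]
          simp only [← hlen]
          rw [← hA]
          exact ih (p ++ [x]) _ _ 0 c _ _ hk' hcnts' hbc2 hbest2
        | succ t =>
          have hA : (if 2 * (((p ++ [x]).count c : Nat) : Int) > (((p ++ [x]).length : Nat) : Int)
              then some c else none)
              = (if 2 * (if cnts.getD x 0 + 1 > bc then cnts.getD x 0 + 1 else bc)
                  > (((p ++ [x]).length : Nat) : Int)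
                then (if cnts.getD x 0 + 1 > bc then some x else best) else none) := hout
          simp only [List.foldl_cons, List.replicate_succ, stepA, stepB, hdict, if_neg hxc]
          simp only [hcnts', ← hlen]
          rw [ite_push, hA]
          exact ih (p ++ [x]) _ _ (t + 1) c _ _ hk' hcnts' hbc2 hbest2

-- ===== VERDICT (by name: the statement is the Claim_ definition above) =====
theorem get_leaders_spec : Claim_equal_get_leaders := by
  intro A _
  unfold Spec_get_leaders get_leaders get_leaders_alt
  have := fold_agree A [] [] PySem.Dict.empty 0 0 none 0
    (by intro y; simp) (by intro y; simp [PySem.Dict.getD_empty]) (by intro y; simp)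
    (Or.inl ⟨rfl, rfl⟩)
  simpa using this
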